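-- pv_equiv track=rewrite | github.com/zhongxiao37/codewar | 4kyuMysteryFunction.py | mystery_core
-- ===== SOURCE A (Python) =====
-- def mystery_core(n):
--     if n < 2:
--         return [str(n)]
--
--     n_bits = "{0:b}".format(n)
--     m = len(n_bits)
--     mystery_list = ['0' for _ in range(m)]
--     mystery_list[0] = '1'
--     child = mystery_core(2 ** m - n - 1)
--     mystery_list[-len(child):] = child
--     return mystery_list
-- ===== SOURCE B (Python) =====
-- def mystery_core(n):
--     if n < 2:
--         return [str(n)]
--     g = n ^ (n >> 1)
--     return list("{0:b}".format(g))
-- ===== Notes on version B (the rewrite author's own statement) =====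
-- stated objective: simpler
-- what changed: A builds the list by recursing on the bit-complement of n and splicing the child into a zero-padded list; B recognises the result as the binary reflected Gray code and returns the binary digits of n XOR (n shifted right once) directly, with no recursion.
import Mathlib
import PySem

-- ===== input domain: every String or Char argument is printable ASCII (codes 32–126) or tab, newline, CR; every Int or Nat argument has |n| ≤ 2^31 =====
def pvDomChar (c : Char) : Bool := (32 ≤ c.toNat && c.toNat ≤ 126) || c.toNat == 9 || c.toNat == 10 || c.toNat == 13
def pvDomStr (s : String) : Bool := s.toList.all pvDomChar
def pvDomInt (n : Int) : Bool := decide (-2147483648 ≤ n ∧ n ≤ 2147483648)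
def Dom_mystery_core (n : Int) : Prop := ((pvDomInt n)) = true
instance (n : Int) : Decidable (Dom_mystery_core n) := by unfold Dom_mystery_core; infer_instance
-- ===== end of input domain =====

-- B replaces A's recursion on the bit-complement by the closed form n ^ (n >> 1)
-- (binary reflected Gray code) formatted in binary; objective: simpler (no recursion).

-- ===== PORT A =====

-- binary digits of k, most significant first ("{0:b}".format k for k ≥ 1; [] for k = 0);
-- hand port of Python's 'b' format, exact on Nat
def pvBits (k : Nat) : List Char :=
  if h : k = 0 then []
  else pvBits (k / 2) ++ [if k % 2 = 1 then '1' else '0']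
  termination_by k
  decreasing_by exact Nat.div_lt_self (Nat.pos_of_ne_zero h) one_lt_two

theorem pvBits_ne_zero (k : Nat) (h : k ≠ 0) :
    pvBits k = pvBits (k / 2) ++ [if k % 2 = 1 then '1' else '0'] := by
  rw [pvBits]; simp [h]

-- bit-length bounds of pvBits (needed by the port's termination argument)
theorem pvBits_bounds (k : Nat) (hk : 1 ≤ k) :
    1 ≤ (pvBits k).length ∧ 2 ^ ((pvBits k).length - 1) ≤ k ∧ k < 2 ^ (pvBits k).length := by
  induction k using Nat.strong_induction_on with
  | _ k ih =>
    rcases Nat.lt_or_ge k 2 with h2 | h2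
    · interval_cases k
      · simp [pvBits_ne_zero 1 (by omega), pvBits]
    · have hne : k ≠ 0 := by omega
      have hhalf : 1 ≤ k / 2 := by omega
      obtain ⟨h1, hlo, hhi⟩ := ih (k / 2) (by omega) hhalf
      rw [pvBits_ne_zero k hne]
      simp only [List.length_append, List.length_singleton]
      refine ⟨by omega, ?_, ?_⟩
      · have : 2 ^ ((pvBits (k / 2)).length - 1 + 1) ≤ 2 * (k / 2) := by
          rw [pow_succ]; omega
        have he : (pvBits (k / 2)).length - 1 + 1 = (pvBits (k / 2)).length := by omega
        rw [he] at this
        have : (pvBits (k/2)).length + 1 - 1 = (pvBits (k/2)).length := by omega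
        rw [this]; omega
      · rw [pow_succ]; omega

def mystery_core (n : Int) : List String :=
  if n < 2 then [PySem.Int.toStr n]
  else
    let n_bits := pvBits n.toNat          -- "{0:b}".format(n), exact since n ≥ 2 here
    let m := n_bits.length
    let mystery_list := (List.replicate m "0").set 0 "1"
    let child := mystery_core (2 ^ m - n - 1)
    -- mystery_list[-len(child):] = child; exact since child is nonempty and no longer than m
    mystery_list.take (m - child.length) ++ child
  termination_by n.toNat
  decreasing_by
    have hN : 2 ≤ n.toNat := by omega
    obtain ⟨h1, hlo, hhiB⟩ := pvBits_bounds n.toNat (by omega)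
    have hm2 : 2 ≤ (pvBits n.toNat).length := by
      by_contra h
      have h1' : (pvBits n.toNat).length = 1 := by omega
      rw [h1'] at hhiB; omega
    -- 2 ^ m ≤ 2 * n  hence  2 ^ m - n - 1 < n
    have hp : 2 ^ ((pvBits n.toNat).length - 1 + 1) ≤ 2 * n.toNat := by
      rw [pow_succ]; omega
    have he : (pvBits n.toNat).length - 1 + 1 = (pvBits n.toNat).length := by omega
    rw [he] at hp
    have hpI : (2 : Int) ^ (pvBits n.toNat).length ≤ 2 * n := by
      calc (2 : Int) ^ (pvBits n.toNat).length
          = ((2 ^ (pvBits n.toNat).length : Nat) : Int) := by push_cast; ring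
        _ ≤ 2 * (n.toNat : Int) := by exact_mod_cast hp
        _ ≤ 2 * n := by omega
    show ((2 : Int) ^ (pvBits n.toNat).length - n - 1).toNat < n.toNat
    omega

-- ===== PORT B =====
def mystery_core_alt (n : Int) : List String :=
  if n < 2 then [PySem.Int.toStr n]
  else
    -- g = n ^ (n >> 1): Lean's Int has no xor, so it is taken on toNat; exact since n ≥ 2
    let g := n.toNat ^^^ (n.toNat >>> 1)
    -- list("{0:b}".format(g)): each binary digit as a one-character string
    (pvBits g).map (fun c => String.mk [c])

-- ===== PRECONDITION & SPEC =====
def Spec_mystery_core (n : Int) (out : List String) : Prop := out = mystery_core_alt n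
instance (n : Int) (out : List String) : Decidable (Spec_mystery_core n out) := by unfold Spec_mystery_core; infer_instance

-- ===== CLAIM (what is proved, stated in full; the proofs are below) =====
def Claim_equal_mystery_core : Prop := ∀ (n : Int), Dom_mystery_core n → Spec_mystery_core n (mystery_core n)

-- ===== LEMMAS AND PROOFS =====

theorem pvBits_zero : pvBits 0 = [] := by rw [pvBits]; rfl

theorem pvStr0 : String.mk ['0'] = "0" := rfl

theorem pvStr1 : String.mk ['1'] = "1" := rfl

-- Gray code of k
def pvGray (k : Nat) : Nat := k ^^^ k / 2

theorem pvGray_lt {k n : Nat} (h : k < 2 ^ n) : pvGray k < 2 ^ n :=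
  Nat.xor_lt_two_pow h (lt_of_le_of_lt (Nat.div_le_self k 2) h)

theorem pvGray_ne_zero {k : Nat} (h : 1 ≤ k) : pvGray k ≠ 0 := by
  intro h0
  have := Nat.xor_eq_zero_iff.mp h0
  omega

-- top bit of any N with 2^k ≤ N < 2^(k+1)
theorem testBit_top {k N : Nat} (hlo : 2 ^ k ≤ N) (hhi : N < 2 ^ (k + 1)) :
    N.testBit k = true := by
  have hr : N = 2 ^ k + (N - 2 ^ k) := by omega
  rw [hr, Nat.testBit_two_pow_add_eq]
  have : N - 2 ^ k < 2 ^ k := by rw [pow_succ] at hhi; omega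
  rw [Nat.testBit_lt_two_pow this]
  rfl

-- the heart of the equivalence: the Gray code splits along A's recursion
theorem pvGray_decomp (k N : Nat) (hlo : 2 ^ k ≤ N) (hhi : N < 2 ^ (k + 1)) :
    pvGray N = 2 ^ k + pvGray (2 ^ (k + 1) - (N + 1)) := by
  have hC : 2 ^ (k + 1) - (N + 1) < 2 ^ k := by rw [pow_succ] at hhi ⊢; omega
  have hgC : pvGray (2 ^ (k + 1) - (N + 1)) < 2 ^ k := pvGray_lt hC
  apply Nat.eq_of_testBit_eq
  intro i
  have hsub : ∀ j, (2 ^ (k + 1) - (N + 1)).testBit j = (decide (j < k + 1) && !N.testBit j) :=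
    Nat.testBit_two_pow_sub_succ hhi
  rcases Nat.lt_trichotomy i k with hik | hik | hik
  · -- low bits agree with the complement's Gray bits
    rw [Nat.testBit_two_pow_add_gt hik]
    simp only [pvGray, Nat.testBit_xor, Nat.testBit_div_two, hsub]
    have h1 : decide (i < k + 1) = true := by simp; omega
    have h2 : decide (i + 1 < k + 1) = true := by simp; omega
    rw [h1, h2]
    simp
  · -- bit k: set on the left, clear in the child's Gray code
    subst hik
    rw [Nat.testBit_two_pow_add_eq, Nat.testBit_lt_two_pow hgC]
    simp only [pvGray, Nat.testBit_xor, Nat.testBit_div_two]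
    rw [testBit_top hlo hhi, Nat.testBit_lt_two_pow hhi]
    rfl
  · -- bits above k: clear on both sides
    have hm : 2 ^ (i + 1) ≥ 2 ^ (k + 1) := Nat.pow_le_pow_right (by omega) (by omega)
    have hi2 : 2 ^ i ≥ 2 ^ (k + 1) := Nat.pow_le_pow_right (by omega) (by omega)
    have l1 : N.testBit i = false := Nat.testBit_lt_two_pow (by omega)
    have l2 : N.testBit (i + 1) = false := Nat.testBit_lt_two_pow (by omega)
    have l3 : (2 ^ k + pvGray (2 ^ (k + 1) - (N + 1))).testBit i = false := by
      apply Nat.testBit_lt_two_pow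
      have : 2 ^ k + 2 ^ k = 2 ^ (k + 1) := by rw [pow_succ]; omega
      omega
    rw [l3]
    simp only [pvGray, Nat.testBit_xor, Nat.testBit_div_two, l1, l2]
    rfl

-- binary digits of 2^k + r, r < 2^k: a leading 1, zero padding, then the digits of r
theorem pvBits_pow_add (k : Nat) : ∀ r, r < 2 ^ k →
    pvBits (2 ^ k + r) = '1' :: (List.replicate (k - (pvBits r).length) '0' ++ pvBits r) := by
  induction k with
  | zero =>
    intro r hr
    have : r = 0 := by omega
    subst this
    norm_num
    rw [pvBits_ne_zero 1 (by omega), pvBits_zero]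
    simp
  | succ k ih =>
    intro r hr
    have hx : (2 ^ (k + 1) + r) ≠ 0 := by positivity
    have h2k : 2 ^ (k + 1) = 2 * 2 ^ k := by rw [pow_succ]; ring
    have hdiv : (2 ^ (k + 1) + r) / 2 = 2 ^ k + r / 2 := by omega
    have hmod : (2 ^ (k + 1) + r) % 2 = r % 2 := by omega
    rw [pvBits_ne_zero _ hx, hdiv, hmod, ih (r / 2) (by omega)]
    rcases Nat.eq_zero_or_pos r with h0 | hpos
    · subst h0
      simp [pvBits, ← List.replicate_succ']
    · have hrne : r ≠ 0 := by omega
      rw [pvBits_ne_zero r hrne]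
      simp only [List.length_append, List.length_singleton, List.cons_append, List.append_assoc]
      congr 2
      rw [show k + 1 - ((pvBits (r / 2)).length + 1) = k - (pvBits (r / 2)).length from by omega]

-- B's port, characterised for positive arguments
theorem alt_pos (C : Nat) (hC : 1 ≤ C) :
    mystery_core_alt (C : Int) = (pvBits (pvGray C)).map (fun c => String.mk [c]) := by
  rcases Nat.lt_or_ge C 2 with h2 | h2
  · have : C = 1 := by omega
    subst this
    rw [mystery_core_alt]
    norm_num
    rw [show pvGray 1 = 1 from rfl, pvBits_ne_zero 1 (by omega), pvBits_zero]
    simp [PySem.Int.toStr]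
    decide
  · rw [mystery_core_alt, if_neg (by exact_mod_cast not_lt.mpr (show (2:Int) ≤ C by exact_mod_cast h2))]
    simp only [Int.toNat_natCast, Nat.shiftRight_one]
    rfl

-- main induction: A equals B on every n ≥ 2
theorem main_ge_two : ∀ (N : Nat) (n : Int), n.toNat = N → 2 ≤ n →
    mystery_core n = mystery_core_alt n := by
  intro N
  induction N using Nat.strong_induction_on with
  | _ N ih =>
    intro n hN h2
    have hN2 : 2 ≤ N := by omega
    obtain ⟨h1, hlo, hhi⟩ := pvBits_bounds N (by omega)
    set m := (pvBits N).length with hm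
    have hm2 : 2 ≤ m := by
      by_contra h
      have : m = 1 := by omega
      rw [this] at hhi; omega
    -- k + 1 = m
    obtain ⟨k, hk⟩ : ∃ k, m = k + 1 := ⟨m - 1, by omega⟩
    have hk1 : 1 ≤ k := by omega
    have hloN : 2 ^ k ≤ N := by rw [hk] at hlo; simpa using hlo
    have hhiN : N < 2 ^ (k + 1) := by rwa [hk] at hhi
    -- the child argument
    set C : Nat := 2 ^ (k + 1) - (N + 1) with hC
    have hCk : C < 2 ^ k := by rw [pow_succ] at hhiN; omega
    have hCsmall : C < N := by
      have : 2 ^ k ≤ N := hloN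
      rw [pow_succ] at hhiN
      omega
    have hcastpow : ((2 : Int) ^ m) = ((2 ^ m : Nat) : Int) := by push_cast; ring
    have hnN : n = (N : Int) := by omega
    have hcarg : (2 : Int) ^ m - n - 1 = (C : Int) := by
      rw [hnN, hcastpow, hC, hk]
      have : N + 1 ≤ 2 ^ (k + 1) := by omega
      push_cast [Nat.cast_sub this]
      ring
    -- unfold A one step
    rw [mystery_core, if_neg (by omega)]
    rw [hN]
    simp only [← hm]
    rw [hcarg]
    -- the child equals B's port on C (both branches if C < 2, induction if C ≥ 2)
    have hchild_eq : mystery_core (C : Int) = mystery_core_alt (C : Int) := by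
      rcases Nat.lt_or_ge C 2 with hC2 | hC2
      · rw [mystery_core, mystery_core_alt]
        have : (C : Int) < 2 := by exact_mod_cast hC2
        rw [if_pos this, if_pos this]
      · exact ih C (by omega) (C : Int) (by simp) (by exact_mod_cast hC2)
    -- B's value at n, decomposed through the Gray code split
    have hgray : pvGray N = 2 ^ k + pvGray C := pvGray_decomp k N hloN hhiN
    have haltn : mystery_core_alt n =
        (pvBits (pvGray N)).map (fun c => String.mk [c]) := by
      rw [hnN]; exact alt_pos N (by omega)
    rw [hchild_eq, haltn, hgray, pvBits_pow_add k (pvGray C) (pvGray_lt hCk)]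
    rcases Nat.eq_zero_or_pos C with hC0 | hCpos
    · -- C = 0: child is ["0"], Gray child is empty digits
      rw [hC0]
      rw [mystery_core_alt, if_pos (by norm_num)]
      have : pvGray 0 = 0 := rfl
      rw [this]
      simp only [pvBits_zero, List.length_nil, Nat.sub_zero, List.append_nil, List.map_cons]
      rw [hk]
      have hset : (List.replicate (k + 1) "0").set 0 "1" = "1" :: List.replicate k "0" := by
        rw [List.replicate_succ]; rfl
      rw [hset]
      have hts : PySem.Int.toStr ((0 : Nat) : Int) = "0" := by decide
      simp only [hts, List.map_replicate, pvStr0, pvStr1]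
      rw [show k = (k - 1) + 1 from by omega]
      rw [show k - 1 + 1 + 1 - ["0"].length = (k - 1) + 1 from by simp]
      rw [List.take_succ_cons, List.take_replicate]
      rw [show min (k - 1) (k - 1 + 1) = k - 1 from by omega]
      rw [List.replicate_succ' (n := k - 1)]
      simp
    · -- C ≥ 1: child is the Gray digits of C
      have hchild : mystery_core_alt (C : Int) = (pvBits (pvGray C)).map (fun c => String.mk [c]) :=
        alt_pos C hCpos
      rw [hchild]
      obtain ⟨hs1, hslo, _⟩ := pvBits_bounds (pvGray C) (by
        have := pvGray_ne_zero hCpos; omega)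
      set s := (pvBits (pvGray C)).length with hs
      have hsk : s ≤ k := by
        by_contra h
        have : 2 ^ k ≤ 2 ^ (s - 1) := Nat.pow_le_pow_right (by omega) (by omega)
        have := pvGray_lt hCk
        omega
      rw [hk]
      have hset : (List.replicate (k + 1) "0").set 0 "1" = "1" :: List.replicate k "0" := by
        rw [List.replicate_succ]; rfl
      rw [hset]
      simp only [List.length_map, ← hs]
      rw [show k + 1 - s = (k - s) + 1 from by omega, List.take_succ_cons, List.take_replicate]
      rw [show min (k - s) k = k - s from by omega]
      simp [pvStr0, pvStr1]

-- ===== VERDICT (by name: the statement is the Claim_ definition above) =====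
theorem mystery_core_spec : Claim_equal_mystery_core := by
  intro n _
  unfold Spec_mystery_core
  rcases lt_or_ge n 2 with h | h
  · rw [mystery_core, mystery_core_alt, if_pos h, if_pos h]
  · exact main_ge_two n.toNat n rfl h
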